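-- pv_equiv track=rewrite | github.com/EJ-L/Code-TREAT | scripts/update_focal_methods_from_coverage.py | resolve_filename
-- ===== SOURCE A (Python) =====
-- from typing import Dict, Iterable, List, Optional, Tuple
--
-- def candidate_filenames(module: str) -> Iterable[str]:
--     dotted = module.split(".")
--     rel = "/".join(dotted) + ".py"
--     yield rel
--     if len(dotted) > 1:
--         yield "/".join(dotted[-2:]) + ".py"
--     yield dotted[-1] + ".py"
--
-- def resolve_filename(module: str, coverage_files: Iterable[str]) -> Optional[str]:
--     files = list(coverage_files)
--     for candidate in candidate_filenames(module):
--         matches = [f for f in files if f.endswith(candidate)]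
--         if len(matches) == 1:
--             return matches[0]
--         if matches:
--             return min(matches, key=len)
--     return None
-- ===== SOURCE B (Python) =====
-- from typing import Iterable, List, Optional
--
--
-- def resolve_filename(module: str, coverage_files: Iterable[str]) -> Optional[str]:
--     parts = module.split(".")
--     cands: List[str] = ["/".join(parts) + ".py"]
--     if len(parts) > 1:
--         cands.append("/".join(parts[-2:]) + ".py")
--     cands.append(parts[-1] + ".py")
--     best = None  # (candidate index, len(file)) of the current winner
--     best_file = None
--     for f in coverage_files:
--         for i, c in enumerate(cands):
--             if f.endswith(c):
--                 key = (i, len(f))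
--                 if best is None or key < best:
--                     best, best_file = key, f
--                 break
--     return best_file
-- ===== Notes on version B (the rewrite author's own statement) =====
-- stated objective: alternative
-- what changed: A scans the whole file list once per candidate (plus a min pass over the matches); B makes a single pass over the files, classifying each by its first matching candidate index and selecting the winner by the composite key (index, length) with first occurrence winning ties.
import Mathlib
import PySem

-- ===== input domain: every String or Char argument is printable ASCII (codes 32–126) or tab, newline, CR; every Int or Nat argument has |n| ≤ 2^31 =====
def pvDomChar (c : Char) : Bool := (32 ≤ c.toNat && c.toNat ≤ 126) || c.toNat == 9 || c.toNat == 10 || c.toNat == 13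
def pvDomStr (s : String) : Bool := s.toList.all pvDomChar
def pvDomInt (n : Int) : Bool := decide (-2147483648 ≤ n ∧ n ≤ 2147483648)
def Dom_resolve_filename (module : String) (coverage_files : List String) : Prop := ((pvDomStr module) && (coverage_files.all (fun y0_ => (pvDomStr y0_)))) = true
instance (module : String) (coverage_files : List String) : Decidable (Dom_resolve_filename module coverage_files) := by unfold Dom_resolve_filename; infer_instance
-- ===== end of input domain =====

-- B replaces A's per-candidate scans over the file list (plus a min pass) by one pass over the
-- files, selecting the winner by the composite key (first matching candidate index, length),
-- first occurrence winning ties; objective: alternative single-pass decomposition.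

-- ===== PORT A =====
-- the generator candidate_filenames, materialised in yield order
def candidate_filenames (module : String) : List String :=
  let dotted := (PySem.Str.split? module ".").getD []   -- sep "." ≠ "", so split? is `some`: getD is exact
  let rel := PySem.Str.join "/" dotted ++ ".py"
  [rel]
    ++ (if dotted.length > 1 then [PySem.Str.join "/" (PySem.List.slice dotted (some (-2)) none) ++ ".py"] else [])
    ++ [(PySem.List.pyGet? dotted (-1)).getD "" ++ ".py"]   -- split? never yields []: dotted[-1] cannot raise, getD is exact

-- the `for candidate in candidate_filenames(module)` loop, recursing over the candidates
def pvALoop (files : List String) : List String → Option String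
  | [] => none
  | c :: rest =>
    let ms := files.filter (fun f => PySem.Str.endswith f c)
    if ms.length == 1 then PySem.List.pyGet? ms 0
    else if !ms.isEmpty then PySem.List.min? ms (fun f => PySem.Str.len f)
    else pvALoop files rest

def resolve_filename (module : String) (coverage_files : List String) : Option String :=
  let files := coverage_files
  pvALoop files (candidate_filenames module)

-- ===== PORT B =====
-- Python tuple `<` on an (index, length) pair: exact lexicographic comparison
def pvKeyLt (k1 k2 : Nat × Int) : Bool := decide (k1.1 < k2.1 ∨ (k1.1 = k2.1 ∧ k1.2 < k2.2))

-- the body of B's `for f in coverage_files` loop; the inner for/break is the first matching index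
def pvBStep (cands : List String) (acc : Option ((Nat × Int) × String)) (f : String) :
    Option ((Nat × Int) × String) :=
  match cands.findIdx? (fun c => PySem.Str.endswith f c) with
  | none => acc
  | some i =>
    let key := (i, PySem.Str.len f)
    match acc with
    | none => some (key, f)
    | some (bk, bf) => if pvKeyLt key bk then some (key, f) else some (bk, bf)

def resolve_filename_alt (module : String) (coverage_files : List String) : Option String :=
  let parts := (PySem.Str.split? module ".").getD []   -- sep "." ≠ "", so split? is `some`: getD is exact
  let cands0 := [PySem.Str.join "/" parts ++ ".py"]
  let cands1 := if parts.length > 1 then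
      cands0 ++ [PySem.Str.join "/" (PySem.List.slice parts (some (-2)) none) ++ ".py"]
    else cands0
  let cands := cands1 ++ [(PySem.List.pyGet? parts (-1)).getD "" ++ ".py"]  -- parts ≠ []: exact
  (coverage_files.foldl (pvBStep cands) none).map (fun b => b.2)

-- ===== PRECONDITION & SPEC =====
def Spec_resolve_filename (module : String) (coverage_files : List String) (out : Option String) : Prop := out = resolve_filename_alt module coverage_files
instance (module : String) (coverage_files : List String) (out : Option String) : Decidable (Spec_resolve_filename module coverage_files out) := by unfold Spec_resolve_filename; infer_instance

-- ===== CLAIM (what is proved, stated in full; the proofs are below) =====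
def Claim_equal_resolve_filename : Prop := ∀ (module : String) (coverage_files : List String), Dom_resolve_filename module coverage_files → Spec_resolve_filename module coverage_files (resolve_filename module coverage_files)

-- ===== LEMMAS AND PROOFS =====
-- The proof layer is generic over the match predicate P (instantiated with endswith) and the
-- length key (instantiated with Str.len), so no string reasoning is needed anywhere.

-- A's candidate loop, generic
def pgALoop (P : String → String → Bool) (key : String → Int) (files : List String) :
    List String → Option String
  | [] => none
  | c :: rest =>
    let ms := files.filter (fun f => P f c)
    if ms.length == 1 then PySem.List.pyGet? ms 0
    else if !ms.isEmpty then PySem.List.min? ms key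
    else pgALoop P key files rest

-- B's loop body, generic
def pgStep (P : String → String → Bool) (key : String → Int) (cands : List String)
    (acc : Option ((Nat × Int) × String)) (f : String) : Option ((Nat × Int) × String) :=
  match cands.findIdx? (fun c => P f c) with
  | none => acc
  | some i =>
    match acc with
    | none => some ((i, key f), f)
    | some (bk, bf) => if pvKeyLt (i, key f) bk then some ((i, key f), f) else some (bk, bf)

-- the contribution of a single file, as an optional keyed entry
def pgSingle (P : String → String → Bool) (key : String → Int) (cands : List String)
    (f : String) : Option ((Nat × Int) × String) :=
  (cands.findIdx? (fun c => P f c)).map (fun i => ((i, key f), f))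

-- combine two optional keyed entries, the left one winning ties
def pvMerge : Option ((Nat × Int) × String) → Option ((Nat × Int) × String) →
    Option ((Nat × Int) × String)
  | none, b => b
  | some a, none => some a
  | some a, some b => if pvKeyLt b.1 a.1 then some b else some a

-- B's fold over the files, generic
def pgR (P : String → String → Bool) (key : String → Int) (cands files : List String) :
    Option ((Nat × Int) × String) :=
  files.foldl (pgStep P key cands) none

theorem pvMerge_assoc (a b c : Option ((Nat × Int) × String)) :
    pvMerge (pvMerge a b) c = pvMerge a (pvMerge b c) := by
  rcases a with _ | a <;> rcases b with _ | b <;> rcases c with _ | c <;>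
    simp only [pvMerge] <;> (try split_ifs) <;> (try simp only [pvMerge]) <;> (try split_ifs) <;>
    simp_all only [pvKeyLt, decide_eq_true_eq] <;> first | rfl | omega

theorem pgStep_eq_merge (P : String → String → Bool) (key : String → Int)
    (cands : List String) (acc : Option ((Nat × Int) × String)) (f : String) :
    pgStep P key cands acc f = pvMerge acc (pgSingle P key cands f) := by
  rcases h : cands.findIdx? (fun c => P f c) with _ | i <;>
    rcases acc with _ | ⟨bk, bf⟩ <;>
    simp only [pgStep, pgSingle, h, Option.map_none, Option.map_some, pvMerge]

theorem pgFoldl_merge (P : String → String → Bool) (key : String → Int) (cands : List String) :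
    ∀ (files : List String) (acc : Option ((Nat × Int) × String)),
    files.foldl (pgStep P key cands) acc = pvMerge acc (pgR P key cands files)
  | [], acc => by cases acc <;> simp [pgR, pvMerge]
  | f :: fs, acc => by
    simp only [pgR, List.foldl_cons]
    rw [pgFoldl_merge P key cands fs (pgStep P key cands acc f),
        pgFoldl_merge P key cands fs (pgStep P key cands none f),
        pgStep_eq_merge, pgStep_eq_merge, pvMerge_assoc]
    rfl

theorem pgR_cons (P : String → String → Bool) (key : String → Int) (cands : List String)
    (f : String) (fs : List String) :
    pgR P key cands (f :: fs) = pvMerge (pgSingle P key cands f) (pgR P key cands fs) := by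
  simp only [pgR, List.foldl_cons]
  rw [pgFoldl_merge, pgStep_eq_merge]
  rfl

-- min? with an abstract key, via the same merge decomposition
def pgM (key : String → Int) : Option String → Option String → Option String
  | none, b => b
  | some a, none => some a
  | some a, some b => if key b < key a then some b else some a

def pgPick (key : String → Int) (b : Option String) (y : String) : Option String :=
  match b with
  | none => some y
  | some m => if key y < key m then some y else some m

theorem pgM_assoc (key : String → Int) (a b c : Option String) :
    pgM key (pgM key a b) c = pgM key a (pgM key b c) := by
  rcases a with _ | a <;> rcases b with _ | b <;> rcases c with _ | c <;>
    simp only [pgM] <;> (try split_ifs) <;> (try simp only [pgM]) <;> (try split_ifs) <;>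
    first | rfl | omega

theorem pgPick_eq_M (key : String → Int) (b : Option String) (y : String) :
    pgPick key b y = pgM key b (some y) := by
  cases b <;> rfl

theorem pgMin_eq_foldl (key : String → Int) (xs : List String) :
    PySem.List.min? xs key = xs.foldl (pgPick key) none := by
  simp only [PySem.List.min?]
  congr 1
  funext b y
  cases b <;> rfl

theorem pgFoldl_pick (key : String → Int) (t : List String) : ∀ (acc : Option String),
    t.foldl (pgPick key) acc = pgM key acc (PySem.List.min? t key) := by
  induction t with
  | nil => intro acc; cases acc <;> simp [PySem.List.min?, pgM]
  | cons y t ih =>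
    intro acc
    rw [List.foldl_cons, ih, pgPick_eq_M, pgM_assoc]
    congr 1
    rw [pgMin_eq_foldl key (y :: t), List.foldl_cons, ih]
    rfl

theorem pgMin_cons (key : String → Int) (x : String) (t : List String) :
    PySem.List.min? (x :: t) key = pgM key (some x) (PySem.List.min? t key) := by
  rw [pgMin_eq_foldl, List.foldl_cons, pgFoldl_pick]
  rfl

-- shifting the candidate index by one (new head candidate matched by nothing)
def pvShift : Option ((Nat × Int) × String) → Option ((Nat × Int) × String)
  | none => none
  | some ((i, l), f) => some ((i + 1, l), f)

theorem pvMerge_shift (a b : Option ((Nat × Int) × String)) :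
    pvMerge (pvShift a) (pvShift b) = pvShift (pvMerge a b) := by
  rcases a with _ | ⟨⟨i, l⟩, f⟩ <;> rcases b with _ | ⟨⟨i', l'⟩, f'⟩ <;>
    simp only [pvShift, pvMerge] <;> split_ifs <;>
    simp_all only [pvKeyLt, decide_eq_true_eq] <;> first | rfl | omega

theorem pgSingle_shift (P : String → String → Bool) (key : String → Int)
    (c : String) (rest : List String) (f : String) (h : P f c = false) :
    pgSingle P key (c :: rest) f = pvShift (pgSingle P key rest f) := by
  simp only [pgSingle, List.findIdx?_cons, h]
  cases List.findIdx? (fun c => P f c) rest <;> simp [pvShift]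

theorem pgR_shift (P : String → String → Bool) (key : String → Int)
    (c : String) (rest : List String) : ∀ (files : List String),
    (∀ f ∈ files, P f c = false) →
    pgR P key (c :: rest) files = pvShift (pgR P key rest files) := by
  intro files
  induction files with
  | nil => intro _; rfl
  | cons f fs ih =>
    intro h
    rw [pgR_cons, pgR_cons, ih (fun g hg => h g (List.mem_cons_of_mem f hg)),
        pgSingle_shift P key c rest f (h f List.mem_cons_self), pvMerge_shift]

-- characterisation of B's fold for a head candidate with at least one match:
-- the winner is the first shortest file matching it, with key index 0
theorem pgR_char (P : String → String → Bool) (key : String → Int)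
    (c : String) (rest : List String) : ∀ (files : List String),
    (∀ k f, files.filter (fun f => P f c) = [] →
        pgR P key (c :: rest) files = some (k, f) → k.1 ≠ 0) ∧
    (∀ m, files.filter (fun f => P f c) = m → m ≠ [] →
        pgR P key (c :: rest) files
          = (PySem.List.min? m key).map (fun g => ((0, key g), g))) := by
  intro files
  induction files with
  | nil =>
    refine ⟨fun k f _ h => by simp [pgR] at h, fun m hm hne => absurd hm.symm hne⟩
  | cons f fs ih =>
    by_cases hf : P f c = true
    · -- head file matches the head candidate: its key has index 0
      have hsing : pgSingle P key (c :: rest) f = some ((0, key f), f) := by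
        simp [pgSingle, List.findIdx?_cons, hf]
      have hfil : (f :: fs).filter (fun f => P f c) = f :: fs.filter (fun f => P f c) := by
        simp [hf]
      constructor
      · intro k g hempty
        rw [hfil] at hempty
        exact absurd hempty (by simp)
      · intro m hm hne
        rw [hfil] at hm
        rcases hfm : fs.filter (fun f => P f c) with _ | ⟨g0, m'⟩
        · -- no further match: f itself wins
          rw [hfm] at hm
          subst hm
          rw [pgR_cons, hsing]
          rcases hR : pgR P key (c :: rest) fs with _ | ⟨⟨⟨i, l⟩, g⟩⟩
          · simp [pvMerge, PySem.List.min?]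
          · have hi : i ≠ 0 := ih.1 (i, l) g hfm hR
            simp only [pvMerge]
            rw [if_neg (by simp only [pvKeyLt, decide_eq_true_eq]; simp; omega)]
            simp [PySem.List.min?]
        · -- some later file matches too: compare f with the best of the tail
          have hR := ih.2 (g0 :: m') hfm (by simp)
          rcases hmin : PySem.List.min? (g0 :: m') key with _ | g'
          · exact absurd ((PySem.List.min?_eq_none_iff _ _).mp hmin) (by simp)
          · rw [hmin] at hR
            rw [hfm] at hm
            subst hm
            rw [pgR_cons, hsing, hR, pgMin_cons, hmin]
            simp only [pvMerge, Option.map_some, pgM]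
            by_cases hlt : key g' < key f
            · rw [if_pos (by simp only [pvKeyLt, decide_eq_true_eq]; simp [hlt]), if_pos hlt]
              rfl
            · rw [if_neg (by simp only [pvKeyLt, decide_eq_true_eq]; simp [hlt]), if_neg hlt]
              rfl
    · -- head file does not match the head candidate
      rw [Bool.not_eq_true] at hf
      have hfil : (f :: fs).filter (fun f => P f c) = fs.filter (fun f => P f c) := by
        simp [hf]
      have hsing : pgSingle P key (c :: rest) f = pvShift (pgSingle P key rest f) :=
        pgSingle_shift P key c rest f hf
      constructor
      · rintro ⟨k1, k2⟩ g hempty hR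
        rw [hfil] at hempty
        rw [pgR_cons, hsing] at hR
        rcases hRfs : pgR P key (c :: rest) fs with _ | ⟨⟨⟨i, l⟩, g'⟩⟩ <;> rw [hRfs] at hR
        · rcases hs : pgSingle P key rest f with _ | ⟨⟨i', l'⟩, g''⟩ <;>
            rw [hs] at hR <;> simp only [pvShift, pvMerge] at hR
          · exact absurd hR (by simp)
          · simp only [Option.some.injEq, Prod.mk.injEq] at hR
            show k1 ≠ 0
            omega
        · have hi : i ≠ 0 := ih.1 (i, l) g' hempty hRfs
          rcases hs : pgSingle P key rest f with _ | ⟨⟨i', l'⟩, g''⟩ <;> rw [hs] at hR <;>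
            simp only [pvShift, pvMerge] at hR
          · simp only [Option.some.injEq, Prod.mk.injEq] at hR
            show k1 ≠ 0
            omega
          · split_ifs at hR <;> simp only [Option.some.injEq, Prod.mk.injEq] at hR <;>
              show k1 ≠ 0 <;> omega
      · intro m hm hne
        rw [hfil] at hm
        have hR := ih.2 m hm hne
        rcases hmin : PySem.List.min? m key with _ | g'
        · exact absurd ((PySem.List.min?_eq_none_iff _ _).mp hmin) hne
        · rw [hmin] at hR
          rw [pgR_cons, hsing, hR]
          rcases hs : pgSingle P key rest f with _ | ⟨⟨i', l'⟩, g''⟩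
          · simp [pvShift, pvMerge]
          · simp only [pvShift, pvMerge, Option.map_some]
            rw [if_pos (by simp only [pvKeyLt, decide_eq_true_eq]; left; simp)]

-- A's candidate loop equals B's single fold, for any candidate list
theorem pgLoop_eq (P : String → String → Bool) (key : String → Int) (files : List String) :
    ∀ (cands : List String),
    pgALoop P key files cands = (pgR P key cands files).map (fun b => b.2) := by
  intro cands
  induction cands with
  | nil =>
    have : pgR P key [] files = none := by
      induction files with
      | nil => rfl
      | cons f fs ih =>
        rw [pgR_cons]
        simpa [pgSingle, List.findIdx?_nil, pvMerge] using ih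
    simp [pgALoop, this]
  | cons c rest ih =>
    rcases hm : files.filter (fun f => P f c) with _ | ⟨g0, m'⟩
    · -- no file matches c: A falls through, B's indices shift by one
      have hnone : ∀ f ∈ files, P f c = false := by
        intro f hfmem
        cases hpc : P f c
        · rfl
        · have : f ∈ files.filter (fun f => P f c) := List.mem_filter.mpr ⟨hfmem, hpc⟩
          rw [hm] at this
          exact absurd this (by simp)
      rw [pgR_shift P key c rest files hnone]
      have hmap : (pvShift (pgR P key rest files)).map (fun b => b.2)
          = (pgR P key rest files).map (fun b => b.2) := by
        rcases pgR P key rest files with _ | ⟨⟨i, l⟩, g⟩ <;> rfl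
      rw [hmap, ← ih]
      simp only [pgALoop, hm]
      rfl
    · -- c has matches: both return the first shortest match for c
      have hR := (pgR_char P key c rest files).2 (g0 :: m') hm (by simp)
      rcases hmin : PySem.List.min? (g0 :: m') key with _ | g'
      · exact absurd ((PySem.List.min?_eq_none_iff _ _).mp hmin) (by simp)
      · rw [hmin] at hR
        simp only [pgALoop, hm, hR]
        rcases m' with _ | ⟨g1, m''⟩
        · have hg : g' = g0 := by
            rw [pgMin_cons] at hmin
            simpa [PySem.List.min?, pgM] using hmin.symm
          subst hg
          simp [PySem.List.pyGet?, PySem.List.pyIdx?]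
        · have hlen : ((g0 :: g1 :: m'').length == 1) = false := by simp
          rw [hlen]
          simp [hmin]

-- instantiation of the generic layer at the ports' predicate and key
theorem pvALoop_inst (files : List String) : ∀ (cands : List String),
    pvALoop files cands
      = pgALoop (fun f c => PySem.Str.endswith f c) (fun f => PySem.Str.len f) files cands := by
  intro cands
  induction cands with
  | nil => rfl
  | cons c rest ih => simp only [pvALoop, pgALoop, ih]

theorem pvBStep_inst (cands : List String) :
    pvBStep cands
      = pgStep (fun f c => PySem.Str.endswith f c) (fun f => PySem.Str.len f) cands := by
  funext acc f
  rcases h : cands.findIdx? (fun c => PySem.Str.endswith f c) with _ | i <;>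
    rcases acc with _ | ⟨bk, bf⟩ <;> simp only [pvBStep, pgStep, h]

-- B's inlined candidate-list construction equals A's candidate_filenames
theorem pvCands_eq (module : String) :
    (let parts := (PySem.Str.split? module ".").getD []
     let cands0 := [PySem.Str.join "/" parts ++ ".py"]
     let cands1 := if parts.length > 1 then
         cands0 ++ [PySem.Str.join "/" (PySem.List.slice parts (some (-2)) none) ++ ".py"]
       else cands0
     cands1 ++ [(PySem.List.pyGet? parts (-1)).getD "" ++ ".py"])
      = candidate_filenames module := by
  simp only [candidate_filenames]
  split_ifs <;> simp

-- ===== VERDICT (by name: the statement is the Claim_ definition above) =====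
theorem resolve_filename_spec : Claim_equal_resolve_filename := by
  intro module coverage_files _
  show resolve_filename module coverage_files = resolve_filename_alt module coverage_files
  rw [resolve_filename, resolve_filename_alt]
  rw [pvCands_eq module, pvBStep_inst, pvALoop_inst]
  exact pgLoop_eq _ _ coverage_files (candidate_filenames module)
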